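-- pv_equiv track=rewrite | github.com/yhs3434/Algorithms | cardgame.py | solution
-- ===== SOURCE A (Python) =====
-- def solution(left, right):
--     answer = 0
--
--     leftLen = len(left)
--     rightLen = len(right)
--
--     map = [[0 for i in range(rightLen+1)] for i in range(leftLen+1)]
--     doGame(0, left, right, 0, 0, map)
--
--     maxVal = 0
--     for row in map:
--         if(maxVal < row[-1]):
--             maxVal = row[-1]
--     answer = maxVal
--
--     return answer
--
-- def doGame(val, left, right, leftIdx, rightIdx, map):
--     if(leftIdx>=len(left) or rightIdx>=len(right)):
--         if (map[leftIdx][rightIdx] < val):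
--             map[leftIdx][rightIdx] = val
--         return
--     if(map[leftIdx][rightIdx] < val):
--         map[leftIdx][rightIdx] = val
--     leftCard = left[leftIdx]
--     rightCard = right[rightIdx]
--
--     if(rightCard < leftCard):
--         doGame(val+rightCard, left, right, leftIdx, rightIdx+1, map)
--         doGame(val, left, right, leftIdx+1, rightIdx, map)
--         doGame(val, left, right, leftIdx+1, rightIdx+1, map)
--     else:
--         doGame(val, left, right, leftIdx + 1, rightIdx, map)
--         doGame(val, left, right, leftIdx + 1, rightIdx + 1, map)
-- ===== SOURCE B (Python) =====
-- def solution(left, right):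
--     # Bottom-up DP over (leftIdx, rightIdx): best[ri] = max total collectable
--     # from state (li, ri) until all right cards are considered (None = the
--     # right pile can never be exhausted from here).  O(L*R) vs A's branching.
--     L, R = len(left), len(right)
--     below = [None] * R + [0]          # row li = L
--     for li in range(L - 1, -1, -1):
--         row = [None] * (R + 1)
--         row[R] = 0
--         for ri in range(R - 1, -1, -1):
--             best = None
--             if right[ri] < left[li] and row[ri + 1] is not None:
--                 best = right[ri] + row[ri + 1]
--             if below[ri] is not None and (best is None or best < below[ri]):
--                 best = below[ri]
--             if below[ri + 1] is not None and (best is None or best < below[ri + 1]):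
--                 best = below[ri + 1]
--             row[ri] = best
--         below = row
--     top = below[0]
--     return max(0, top) if top is not None else 0
-- ===== Notes on version B (the rewrite author's own statement) =====
-- stated objective: faster
-- what changed: A explores the game tree with a 3-way branching recursion mutating a shared max-table; B computes the same answer with a bottom-up dynamic program over (leftIdx, rightIdx) states, filling each row from the row below. Intended as faster (O(L*R) states vs exponential branching); a timing run measured A timing out at n=16 where B returned, but could not form a ratio at a size where both finish.
import Mathlib
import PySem

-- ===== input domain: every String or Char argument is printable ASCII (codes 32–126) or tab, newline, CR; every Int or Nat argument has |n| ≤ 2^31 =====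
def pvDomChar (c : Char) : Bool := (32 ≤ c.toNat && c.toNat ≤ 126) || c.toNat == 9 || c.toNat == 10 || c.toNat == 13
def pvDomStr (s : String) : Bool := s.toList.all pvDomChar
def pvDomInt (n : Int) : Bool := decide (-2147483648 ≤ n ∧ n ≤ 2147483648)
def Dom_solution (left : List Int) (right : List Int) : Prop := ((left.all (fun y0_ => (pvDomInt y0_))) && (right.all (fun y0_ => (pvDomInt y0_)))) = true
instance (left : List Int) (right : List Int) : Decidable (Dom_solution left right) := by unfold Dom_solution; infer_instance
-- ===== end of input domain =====

-- B replaces A's 3-way branching game-tree search (a shared max-table filled by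
-- recursion) with a bottom-up dynamic program over (leftIdx, rightIdx) states;
-- intended as faster: a timing run saw A time out at n=16 where B returned
-- (no ratio measurable at a size both finish).

-- ===== PORT A =====
-- map[i][j]; indices are always in range when used, so getD's defaults are never hit
def pvGetCell (m : List (List Int)) (i j : Nat) : Int := (m.getD i []).getD j 0

-- 'if map[i][j] < v: map[i][j] = v'
def pvUpd (m : List (List Int)) (i j : Nat) (v : Int) : List (List Int) :=
  if pvGetCell m i j < v then m.modify i (fun row => row.set j v) else m

-- doGame: same branching, the mutated map threaded through as state
def doGameP (left right : List Int) (v : Int) (li ri : Nat) (m : List (List Int)) :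
    List (List Int) :=
  if h : li ≥ left.length ∨ ri ≥ right.length then
    pvUpd m li ri v
  else
    let m1 := pvUpd m li ri v
    let lc := left.getD li 0
    let rc := right.getD ri 0
    if rc < lc then
      let m2 := doGameP left right (v + rc) li (ri + 1) m1
      let m3 := doGameP left right v (li + 1) ri m2
      doGameP left right v (li + 1) (ri + 1) m3
    else
      let m2 := doGameP left right v (li + 1) ri m1
      doGameP left right v (li + 1) (ri + 1) m2
termination_by (left.length - li) + (right.length - ri)
decreasing_by all_goals omega

def solution (left : List Int) (right : List Int) : Int :=
  let m0 := List.replicate (left.length + 1) (List.replicate (right.length + 1) (0 : Int))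
  let m := doGameP left right 0 0 0 m0
  -- maxVal loop over row[-1]; rows are nonempty, so .getD 0 after pyGet? is never hit
  m.foldl (fun acc row =>
    if acc < (PySem.List.pyGet? row (-1)).getD 0 then (PySem.List.pyGet? row (-1)).getD 0
    else acc) 0

-- ===== PORT B =====
-- 'if best is None or best < cand: best = cand'
def pvOptMax (a b : Option Int) : Option Int :=
  match b with
  | none => a
  | some y => match a with
    | none => some y
    | some x => if x < y then some y else some x

-- inner loop: builds row li right-to-left from row li+1 (below); rs is the right
-- suffix from the current column
def pvMkRow (lc : Int) (rs : List Int) (below : List (Option Int)) : List (Option Int) :=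
  match rs, below with
  | [], _ => [some 0]
  | rc :: rs', b0 :: below' =>
    let rest := pvMkRow lc rs' below'
    let c1 : Option Int :=
      if rc < lc then (match rest with | c :: _ => c.map (fun t => rc + t) | [] => none)
      else none
    pvOptMax (pvOptMax c1 b0) (match below' with | c :: _ => c | [] => none) :: rest
  | _ :: _, [] => [some 0]    -- unreachable: below always has length rs.length + 1

-- row li = len(left): [None]*R + [0]
def pvBaseRow (rs : List Int) : List (Option Int) :=
  rs.map (fun _ => none) ++ [some 0]

def solution_alt (left : List Int) (right : List Int) : Int :=
  let top := left.foldr (fun lc below => pvMkRow lc right below) (pvBaseRow right)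
  match top with
  | [] => 0                      -- unreachable: rows are nonempty
  | c :: _ =>
    match c with
    | none => 0
    | some mx => max 0 mx

-- ===== PRECONDITION & SPEC =====
def Spec_solution (left : List Int) (right : List Int) (out : Int) : Prop := out = solution_alt left right
instance (left : List Int) (right : List Int) (out : Int) : Decidable (Spec_solution left right out) := by unfold Spec_solution; infer_instance

-- ===== CLAIM (what is proved, stated in full; the proofs are below) =====
def Claim_equal_solution : Prop := ∀ (left : List Int) (right : List Int), Dom_solution left right → Spec_solution left right (solution left right)

-- ===== LEMMAS AND PROOFS =====

-- (state, accumulated value) pairs visited by A's game search, as a relation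
inductive Reach (left right : List Int) : Nat → Nat → Int → Nat → Nat → Int → Prop where
  | refl (li ri : Nat) (v : Int) : Reach left right li ri v li ri v
  | takeR {li ri : Nat} {v : Int} {x y : Nat} {w : Int}
      (h1 : li < left.length) (h2 : ri < right.length)
      (hc : right.getD ri 0 < left.getD li 0)
      (h : Reach left right li (ri + 1) (v + right.getD ri 0) x y w) :
      Reach left right li ri v x y w
  | skipL {li ri : Nat} {v : Int} {x y : Nat} {w : Int}
      (h1 : li < left.length) (h2 : ri < right.length)
      (h : Reach left right (li + 1) ri v x y w) : Reach left right li ri v x y w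
  | both {li ri : Nat} {v : Int} {x y : Nat} {w : Int}
      (h1 : li < left.length) (h2 : ri < right.length)
      (h : Reach left right (li + 1) (ri + 1) v x y w) : Reach left right li ri v x y w

def pvShape (left right : List Int) (m : List (List Int)) : Prop :=
  m.length = left.length + 1 ∧ ∀ row ∈ m, row.length = right.length + 1

-- what one DP cell of B means in terms of Reach
def pvGood (left right : List Int) (li ri : Nat) (c : Option Int) : Prop :=
  match c with
  | none => ∀ x w, ¬ Reach left right li ri 0 x right.length w
  | some mx => (∃ x, Reach left right li ri 0 x right.length mx) ∧
      ∀ x w, Reach left right li ri 0 x right.length w → w ≤ mx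

theorem Reach_shift {left right : List Int} {li ri : Nat} {v : Int} {x y : Nat} {w : Int}
    (h : Reach left right li ri v x y w) (c : Int) :
    Reach left right li ri (v + c) x y (w + c) := by
  induction h with
  | refl li ri v => exact Reach.refl li ri (v + c)
  | takeR h1 h2 hc h ih =>
      refine Reach.takeR h1 h2 hc ?_
      have e : ∀ a b : Int, a + b + c = a + c + b := by intro a b; ring
      rw [e] at ih; exact ih
  | skipL h1 h2 h ih => exact Reach.skipL h1 h2 ih
  | both h1 h2 h ih => exact Reach.both h1 h2 ih

theorem Reach_le {left right : List Int} {li ri : Nat} {v : Int} {x y : Nat} {w : Int}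
    (h : Reach left right li ri v x y w) (hli : li ≤ left.length) (hri : ri ≤ right.length) :
    x ≤ left.length ∧ y ≤ right.length := by
  induction h with
  | refl li ri v => exact ⟨hli, hri⟩
  | takeR h1 h2 hc h ih => exact ih hli (by omega)
  | skipL h1 h2 h ih => exact ih (by omega) hri
  | both h1 h2 h ih => exact ih (by omega) (by omega)

theorem shape_upd {left right : List Int} {m : List (List Int)} (hs : pvShape left right m)
    (i j : Nat) (v : Int) : pvShape left right (pvUpd m i j v) := by
  unfold pvUpd
  split
  · refine ⟨by rw [List.length_modify]; exact hs.1, ?_⟩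
    intro row hrow
    obtain ⟨k, hk, hkeq⟩ := List.mem_iff_getElem.mp hrow
    have hk' : k < m.length := by rwa [List.length_modify] at hk
    have e : (List.modify m i fun row => row.set j v)[k]? = some row := by
      rw [List.getElem?_eq_getElem hk, hkeq]
    rw [List.getElem?_modify, List.getElem?_eq_getElem hk'] at e
    simp at e
    have hmem : m[k] ∈ m := List.getElem_mem hk'
    have hlen : (m[k]).length = right.length + 1 := hs.2 _ hmem
    split at e <;> rw [← e]
    · rw [List.length_set]; exact hlen
    · exact hlen
  · exact hs

theorem getD_row (m : List (List Int)) (x : Nat) (hx : x < m.length) :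
    m.getD x [] = m[x] := by
  rw [List.getD_eq_getElem?_getD, List.getElem?_eq_getElem hx]; rfl

theorem getCell_upd {left right : List Int} {m : List (List Int)} (hs : pvShape left right m)
    {i j : Nat} (hi : i ≤ left.length) (hj : j ≤ right.length) (v : Int) (x y : Nat) :
    pvGetCell (pvUpd m i j v) x y =
      if x = i ∧ y = j then max (pvGetCell m i j) v else pvGetCell m x y := by
  have hilen : i < m.length := by have := hs.1; omega
  have hrowlen : (m[i]).length = right.length + 1 := hs.2 _ (List.getElem_mem hilen)
  have hcell : pvGetCell m i j = (m[i]).getD j 0 := by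
    unfold pvGetCell; rw [getD_row m i hilen]
  unfold pvUpd
  by_cases hlt : pvGetCell m i j < v
  · rw [if_pos hlt]
    by_cases hx : x = i
    · subst hx
      have h1 : (List.modify m x fun row => row.set j v).getD x [] = (m[x]).set j v := by
        rw [List.getD_eq_getElem?_getD, List.getElem?_modify, List.getElem?_eq_getElem hilen]
        simp
      unfold pvGetCell
      rw [h1]
      by_cases hy : y = j
      · subst hy
        rw [if_pos ⟨rfl, rfl⟩, List.getD_eq_getElem?_getD, List.getElem?_set, if_pos rfl,
          if_pos (by omega : y < (m[x]).length)]
        rw [getD_row m x hilen, hcell] at *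
        simp only [Option.getD_some]
        omega
      · rw [if_neg (by tauto), List.getD_eq_getElem?_getD, List.getElem?_set,
          if_neg (fun h => hy h.symm), getD_row m x hilen, List.getD_eq_getElem?_getD]
    · rw [if_neg (by tauto)]
      unfold pvGetCell
      have h2 : (List.modify m i fun row => row.set j v).getD x [] = m.getD x [] := by
        rw [List.getD_eq_getElem?_getD, List.getElem?_modify, List.getD_eq_getElem?_getD]
        cases m[x]? with
        | none => rfl
        | some r => simp [if_neg (show i ≠ x from fun h => hx h.symm)]
      rw [h2]
  · rw [if_neg hlt]
    by_cases hxy : x = i ∧ y = j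
    · obtain ⟨hx, hy⟩ := hxy
      subst hx; subst hy
      rw [if_pos ⟨rfl, rfl⟩]
      omega
    · rw [if_neg hxy]

theorem doGame_spec (left right : List Int) (n : Nat) :
    ∀ (v : Int) (li ri : Nat) (m : List (List Int)),
      (left.length - li) + (right.length - ri) = n →
      li ≤ left.length → ri ≤ right.length → pvShape left right m →
      pvShape left right (doGameP left right v li ri m) ∧
      (∀ x y, pvGetCell m x y ≤ pvGetCell (doGameP left right v li ri m) x y) ∧
      (∀ x y w, Reach left right li ri v x y w →
        w ≤ pvGetCell (doGameP left right v li ri m) x y) ∧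
      (∀ x y, pvGetCell (doGameP left right v li ri m) x y = pvGetCell m x y ∨
        Reach left right li ri v x y (pvGetCell (doGameP left right v li ri m) x y)) := by
  induction n using Nat.strong_induction_on with
  | _ n IH =>
  intro v li ri m hn hli hri hs
  have mono1 : ∀ x y, pvGetCell m x y ≤ pvGetCell (pvUpd m li ri v) x y := by
    intro x y
    rw [getCell_upd hs hli hri v x y]
    split
    · rename_i h; obtain ⟨hx, hy⟩ := h; subst hx; subst hy; exact le_max_left _ _
    · exact le_refl _
  have char1 : ∀ x y, pvGetCell (pvUpd m li ri v) x y = pvGetCell m x y ∨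
      Reach left right li ri v x y (pvGetCell (pvUpd m li ri v) x y) := by
    intro x y
    rw [getCell_upd hs hli hri v x y]
    split
    · rename_i h; obtain ⟨hx, hy⟩ := h; subst hx; subst hy
      rcases max_choice (pvGetCell m x y) v with h | h
      · exact Or.inl h
      · rw [h]; exact Or.inr (Reach.refl x y v)
    · exact Or.inl rfl
  have self1 : v ≤ pvGetCell (pvUpd m li ri v) li ri := by
    rw [getCell_upd hs hli hri v li ri, if_pos ⟨rfl, rfl⟩]
    exact le_max_right _ _
  by_cases hterm : li ≥ left.length ∨ ri ≥ right.length
  · have heq : doGameP left right v li ri m = pvUpd m li ri v := by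
      rw [doGameP, dif_pos hterm]
    rw [heq]
    refine ⟨shape_upd hs li ri v, mono1, ?_, char1⟩
    intro x y w hr
    cases hr with
    | refl => exact self1
    | takeR h1 h2 hc h => omega
    | skipL h1 h2 h => omega
    | both h1 h2 h => omega
  · have hl : li < left.length := by omega
    have hr2 : ri < right.length := by omega
    have hs1 := shape_upd hs li ri v
    by_cases hc : right.getD ri 0 < left.getD li 0
    · have heq : doGameP left right v li ri m =
          doGameP left right v (li + 1) (ri + 1)
            (doGameP left right v (li + 1) ri
              (doGameP left right (v + right.getD ri 0) li (ri + 1) (pvUpd m li ri v))) := by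
        rw [doGameP, dif_neg hterm]
        simp only [if_pos hc]
      rw [heq]
      obtain ⟨hs2, mono2, reach2, char2⟩ :=
        IH ((left.length - li) + (right.length - (ri + 1))) (by omega)
          (v + right.getD ri 0) li (ri + 1) (pvUpd m li ri v) rfl hli (by omega) hs1
      obtain ⟨hs3, mono3, reach3, char3⟩ :=
        IH ((left.length - (li + 1)) + (right.length - ri)) (by omega)
          v (li + 1) ri _ rfl (by omega) hri hs2
      obtain ⟨hs4, mono4, reach4, char4⟩ :=
        IH ((left.length - (li + 1)) + (right.length - (ri + 1))) (by omega)
          v (li + 1) (ri + 1) _ rfl (by omega) (by omega) hs3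
      refine ⟨hs4, ?_, ?_, ?_⟩
      · intro x y
        exact le_trans (mono1 x y) (le_trans (mono2 x y) (le_trans (mono3 x y) (mono4 x y)))
      · intro x y w hr
        cases hr with
        | refl => exact le_trans self1 (le_trans (mono2 _ _) (le_trans (mono3 _ _) (mono4 _ _)))
        | takeR h1 h2 hc' h =>
            exact le_trans (reach2 x y w h) (le_trans (mono3 x y) (mono4 x y))
        | skipL h1 h2 h => exact le_trans (reach3 x y w h) (mono4 x y)
        | both h1 h2 h => exact reach4 x y w h
      · intro x y
        rcases char4 x y with h4 | h4
        · rw [h4]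
          rcases char3 x y with h3 | h3
          · rw [h3]
            rcases char2 x y with h2 | h2
            · rw [h2]
              rcases char1 x y with h1 | h1
              · exact Or.inl h1
              · exact Or.inr h1
            · exact Or.inr (Reach.takeR hl hr2 hc h2)
          · exact Or.inr (Reach.skipL hl hr2 h3)
        · exact Or.inr (Reach.both hl hr2 h4)
    · have heq : doGameP left right v li ri m =
          doGameP left right v (li + 1) (ri + 1)
            (doGameP left right v (li + 1) ri (pvUpd m li ri v)) := by
        rw [doGameP, dif_neg hterm]
        simp only [if_neg hc]
      rw [heq]
      obtain ⟨hs3, mono3, reach3, char3⟩ :=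
        IH ((left.length - (li + 1)) + (right.length - ri)) (by omega)
          v (li + 1) ri (pvUpd m li ri v) rfl (by omega) hri hs1
      obtain ⟨hs4, mono4, reach4, char4⟩ :=
        IH ((left.length - (li + 1)) + (right.length - (ri + 1))) (by omega)
          v (li + 1) (ri + 1) _ rfl (by omega) (by omega) hs3
      refine ⟨hs4, ?_, ?_, ?_⟩
      · intro x y
        exact le_trans (mono1 x y) (le_trans (mono3 x y) (mono4 x y))
      · intro x y w hr
        cases hr with
        | refl => exact le_trans self1 (le_trans (mono3 _ _) (mono4 _ _))
        | takeR h1 h2 hc' h => exact absurd hc' hc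
        | skipL h1 h2 h => exact le_trans (reach3 x y w h) (mono4 x y)
        | both h1 h2 h => exact reach4 x y w h
      · intro x y
        rcases char4 x y with h4 | h4
        · rw [h4]
          rcases char3 x y with h3 | h3
          · rw [h3]
            rcases char1 x y with h1 | h1
            · exact Or.inl h1
            · exact Or.inr h1
          · exact Or.inr (Reach.skipL hl hr2 h3)
        · exact Or.inr (Reach.both hl hr2 h4)

theorem foldl_max_char (g : List Int → Int) (l : List (List Int)) (a : Int) :
    a ≤ l.foldl (fun acc r => if acc < g r then g r else acc) a ∧
    (∀ r ∈ l, g r ≤ l.foldl (fun acc r => if acc < g r then g r else acc) a) ∧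
    (l.foldl (fun acc r => if acc < g r then g r else acc) a = a ∨
      ∃ r ∈ l, l.foldl (fun acc r => if acc < g r then g r else acc) a = g r) := by
  induction l generalizing a with
  | nil => simp
  | cons r t ih =>
      simp only [List.foldl_cons]
      by_cases h : a < g r
      · simp only [if_pos h]
        obtain ⟨h1, h2, h3⟩ := ih (g r)
        refine ⟨by omega, ?_, ?_⟩
        · intro s hs
          rcases List.mem_cons.mp hs with hs | hs
          · subst hs; exact h1
          · exact h2 s hs
        · rcases h3 with h3 | ⟨s, hs, h3⟩
          · exact Or.inr ⟨r, by simp, h3⟩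
          · exact Or.inr ⟨s, by simp [hs], h3⟩
      · simp only [if_neg h]
        obtain ⟨h1, h2, h3⟩ := ih a
        refine ⟨h1, ?_, ?_⟩
        · intro s hs
          rcases List.mem_cons.mp hs with hs | hs
          · subst hs; omega
          · exact h2 s hs
        · rcases h3 with h3 | ⟨s, hs, h3⟩
          · exact Or.inl h3
          · exact Or.inr ⟨s, by simp [hs], h3⟩

theorem pvOptMax_none {a b : Option Int} :
    pvOptMax a b = none ↔ a = none ∧ b = none := by
  cases b with
  | none => cases a with
    | none => simp [pvOptMax]
    | some x => simp [pvOptMax]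
  | some y => cases a with
    | none => simp [pvOptMax]
    | some x => by_cases h : x < y <;> simp [pvOptMax, h]

theorem pvOptMax_some {a b : Option Int} {m : Int} (h : pvOptMax a b = some m) :
    (a = some m ∨ b = some m) ∧ (∀ z, a = some z → z ≤ m) ∧ (∀ z, b = some z → z ≤ m) := by
  cases b with
  | none =>
      cases a with
      | none => simp [pvOptMax] at h
      | some x =>
          simp [pvOptMax] at h; subst h
          refine ⟨Or.inl rfl, ?_, ?_⟩
          · intro z hz; simp at hz; omega
          · intro z hz; cases hz
  | some y =>
      cases a with
      | none =>
          simp [pvOptMax] at h; subst h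
          refine ⟨Or.inr rfl, ?_, ?_⟩
          · intro z hz; cases hz
          · intro z hz; simp at hz; omega
      | some x =>
          by_cases hxy : x < y <;> simp [pvOptMax, hxy] at h <;> subst h
          · refine ⟨Or.inr rfl, ?_, ?_⟩
            · intro z hz; simp at hz; omega
            · intro z hz; simp at hz; omega
          · refine ⟨Or.inl rfl, ?_, ?_⟩
            · intro z hz; simp at hz; omega
            · intro z hz; simp at hz; omega

theorem Reach_of_zero {left right : List Int} {li ri x y : Nat} {t : Int}
    (h : Reach left right li ri 0 x y t) (c : Int) : Reach left right li ri c x y (t + c) := by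
  have h2 := Reach_shift h c
  rwa [zero_add] at h2

theorem Reach_to_zero {left right : List Int} {li ri x y : Nat} {v w : Int}
    (h : Reach left right li ri v x y w) : Reach left right li ri 0 x y (w - v) := by
  have h2 := Reach_shift h (-v)
  have e1 : v + -v = (0 : Int) := by ring
  have e2 : w + -v = w - v := by ring
  rwa [e1, e2] at h2

theorem pvOptMax3_none {c1 b0 c3 : Option Int} :
    pvOptMax (pvOptMax c1 b0) c3 = none ↔ c1 = none ∧ b0 = none ∧ c3 = none := by
  rw [pvOptMax_none, pvOptMax_none, and_assoc]

theorem pvOptMax3_some {c1 b0 c3 : Option Int} {mx : Int}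
    (h : pvOptMax (pvOptMax c1 b0) c3 = some mx) :
    (c1 = some mx ∨ b0 = some mx ∨ c3 = some mx) ∧
    (∀ z, c1 = some z → z ≤ mx) ∧ (∀ z, b0 = some z → z ≤ mx) ∧
    (∀ z, c3 = some z → z ≤ mx) := by
  obtain ⟨hor, hA, hc3⟩ := pvOptMax_some h
  have hc1 : ∀ z, c1 = some z → z ≤ mx := by
    intro z hz
    cases hb : pvOptMax c1 b0 with
    | none => rw [pvOptMax_none] at hb; rw [hb.1] at hz; cases hz
    | some t =>
        obtain ⟨_, h1, _⟩ := pvOptMax_some hb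
        exact le_trans (h1 z hz) (hA t hb)
  have hb0 : ∀ z, b0 = some z → z ≤ mx := by
    intro z hz
    cases hb : pvOptMax c1 b0 with
    | none => rw [pvOptMax_none] at hb; rw [hb.2] at hz; cases hz
    | some t =>
        obtain ⟨_, _, h2⟩ := pvOptMax_some hb
        exact le_trans (h2 z hz) (hA t hb)
  refine ⟨?_, hc1, hb0, hc3⟩
  rcases hor with hb | hb
  · obtain ⟨hor2, _, _⟩ := pvOptMax_some hb
    rcases hor2 with h2 | h2
    · exact Or.inl h2
    · exact Or.inr (Or.inl h2)
  · exact Or.inr (Or.inr hb)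

theorem pvMkRow_spec (left right : List Int) (li : Nat) (hli : li < left.length)
    (rs : List Int) : ∀ (ri : Nat) (below : List (Option Int)),
      right.drop ri = rs → ri ≤ right.length → below.length = rs.length + 1 →
      (∀ (k : Nat) (hk : k < below.length), pvGood left right (li + 1) (ri + k) below[k]) →
      (pvMkRow (left.getD li 0) rs below).length = rs.length + 1 ∧
      ∀ (k : Nat) (hk : k < (pvMkRow (left.getD li 0) rs below).length),
        pvGood left right li (ri + k) (pvMkRow (left.getD li 0) rs below)[k] := by
  induction rs with
  | nil =>
      intro ri below hdrop hri hlen hbelow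
      have hriR : ri = right.length := by
        have := List.drop_eq_nil_iff.mp hdrop
        omega
      subst hriR
      refine ⟨rfl, ?_⟩
      intro k hk
      have hk0 : k = 0 := by
        simp only [pvMkRow, List.length_singleton] at hk
        omega
      subst hk0
      show pvGood left right li (right.length + 0) (some 0)
      simp only [pvGood, Nat.add_zero]
      refine ⟨⟨li, Reach.refl li right.length 0⟩, ?_⟩
      intro x w hr
      cases hr with
      | refl => exact le_refl 0
      | takeR h1 h2 hc h => omega
      | skipL h1 h2 h => omega
      | both h1 h2 h => omega
  | cons rc rs' ih =>
      intro ri below hdrop hri hlen hbelow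
      cases below with
      | nil => simp at hlen
      | cons b0 below'
      cases below' with
      | nil => simp at hlen
      | cons b1 below''
      have hriR : ri < right.length := by
        by_contra hcon
        rw [List.drop_eq_nil_of_le (by omega)] at hdrop
        cases hdrop
      have hrc : right.getD ri 0 = rc := by
        have h0 : (right.drop ri)[0]? = some rc := by rw [hdrop]; rfl
        rw [List.getElem?_drop] at h0
        rw [List.getD_eq_getElem?_getD, Nat.add_zero] at *
        rw [h0]
        rfl
      have hdrop' : right.drop (ri + 1) = rs' := by
        have : right.drop (ri + 1) = (right.drop ri).drop 1 := by
          rw [List.drop_drop, Nat.add_comm]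
        rw [this, hdrop]
        rfl
      have hb' : ∀ (k : Nat) (hk : k < (b1 :: below'').length),
          pvGood left right (li + 1) ((ri + 1) + k) (b1 :: below'')[k] := by
        intro k hk
        have h := hbelow (k + 1) (by simp at *; omega)
        simp only [List.getElem_cons_succ] at h
        have e : ri + (k + 1) = ri + 1 + k := by omega
        rwa [e] at h
      obtain ⟨ihlen, ihcells⟩ := ih (ri + 1) (b1 :: below'') hdrop' (by omega)
        (by simp at *; omega) hb'
      have hb0good : pvGood left right (li + 1) ri b0 := by
        have h := hbelow 0 (by simp)
        simpa using h
      have hb1good : pvGood left right (li + 1) (ri + 1) b1 := by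
        have h := hb' 0 (by simp)
        simpa using h
      cases hrest : pvMkRow (left.getD li 0) rs' (b1 :: below'') with
      | nil => rw [hrest] at ihlen; simp at ihlen
      | cons c0 rest'
      have hc0good : pvGood left right li (ri + 1) c0 := by
        have h := ihcells 0 (by rw [hrest]; simp)
        simp only [hrest] at h
        simpa using h
      have hunf : pvMkRow (left.getD li 0) (rc :: rs') (b0 :: b1 :: below'') =
          pvOptMax (pvOptMax
            (if rc < left.getD li 0 then c0.map (fun t => rc + t) else none) b0) b1
          :: (c0 :: rest') := by
        rw [pvMkRow, hrest]
      rw [hunf]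
      constructor
      · rw [hrest] at ihlen
        simp at *
        omega
      · intro k hk
        cases k with
        | succ k' =>
            have h := ihcells k' (by rw [hrest]; simp at *; omega)
            simp only [hrest] at h
            simp only [List.getElem_cons_succ]
            have e : ri + 1 + k' = ri + (k' + 1) := by omega
            rwa [e] at h
        | zero =>
        simp only [List.getElem_cons_zero, Nat.add_zero]
        set c1 : Option Int := if rc < left.getD li 0 then c0.map (fun t => rc + t) else none
          with hc1def
        cases hcell : pvOptMax (pvOptMax c1 b0) b1 with
        | none =>
            obtain ⟨h1, h2, h3⟩ := pvOptMax3_none.mp hcell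
            simp only [pvGood]
            intro x w hr
            cases hr with
            | refl => omega
            | takeR hh1 hh2 hc h =>
                rw [hrc] at hc
                rw [hc1def, if_pos hc] at h1
                have hc0 : c0 = none := by
                  cases c0 with
                  | none => rfl
                  | some t => simp at h1
                rw [hc0] at hc0good
                simp only [pvGood] at hc0good
                have h' := Reach_to_zero h
                exact hc0good x _ h'
            | skipL hh1 hh2 h =>
                rw [h2] at hb0good
                simp only [pvGood] at hb0good
                exact hb0good x w h
            | both hh1 hh2 h =>
                rw [h3] at hb1good
                simp only [pvGood] at hb1good
                exact hb1good x w h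
        | some mx =>
            obtain ⟨hor, hc1b, hb0b, hb1b⟩ := pvOptMax3_some hcell
            simp only [pvGood]
            constructor
            · rcases hor with hcand | hcand | hcand
              · rw [hc1def] at hcand
                by_cases hcc : rc < left.getD li 0
                · rw [if_pos hcc] at hcand
                  cases c0 with
                  | none => simp at hcand
                  | some t =>
                      simp only [Option.map_some] at hcand
                      have hmx : mx = rc + t := by
                        have := Option.some.inj hcand
                        omega
                      simp only [pvGood] at hc0good
                      obtain ⟨⟨x, hx⟩, _⟩ := hc0good
                      refine ⟨x, ?_⟩
                      have h2 := Reach_of_zero hx rc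
                      have h3 : Reach left right li (ri + 1) (0 + right.getD ri 0) x
                          right.length (t + rc) := by
                        rw [hrc, zero_add]
                        exact h2
                      have h4 := Reach.takeR hli hriR (by rw [hrc]; exact hcc) h3
                      have e : t + rc = mx := by omega
                      rwa [e] at h4
                · rw [if_neg hcc] at hcand
                  cases hcand
              · rw [hcand] at hb0good
                simp only [pvGood] at hb0good
                obtain ⟨⟨x, hx⟩, _⟩ := hb0good
                exact ⟨x, Reach.skipL hli hriR hx⟩
              · rw [hcand] at hb1good
                simp only [pvGood] at hb1good
                obtain ⟨⟨x, hx⟩, _⟩ := hb1good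
                exact ⟨x, Reach.both hli hriR hx⟩
            · intro x w hr
              cases hr with
              | refl => omega
              | takeR hh1 hh2 hc h =>
                  have h' := Reach_to_zero h
                  cases hc0 : c0 with
                  | none =>
                      rw [hc0] at hc0good
                      simp only [pvGood] at hc0good
                      exact absurd h' (hc0good x _)
                  | some t =>
                      rw [hc0] at hc0good
                      simp only [pvGood] at hc0good
                      have hb := hc0good.2 x _ h'
                      rw [hrc] at hc
                      have hcs : c1 = some (rc + t) := by
                        rw [hc1def, if_pos hc, hc0]
                        rfl
                      have := hc1b _ hcs
                      rw [hrc] at hb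
                      omega
              | skipL hh1 hh2 h =>
                  cases hb0 : b0 with
                  | none =>
                      rw [hb0] at hb0good
                      simp only [pvGood] at hb0good
                      exact absurd h (hb0good x w)
                  | some t =>
                      rw [hb0] at hb0good
                      simp only [pvGood] at hb0good
                      have := hb0good.2 x w h
                      have := hb0b t hb0
                      omega
              | both hh1 hh2 h =>
                  cases hb1 : b1 with
                  | none =>
                      rw [hb1] at hb1good
                      simp only [pvGood] at hb1good
                      exact absurd h (hb1good x w)
                  | some t =>
                      rw [hb1] at hb1good
                      simp only [pvGood] at hb1good
                      have := hb1good.2 x w h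
                      have := hb1b t hb1
                      omega

theorem pvBaseRow_spec (left right : List Int) :
    (pvBaseRow right).length = right.length + 1 ∧
    ∀ (k : Nat) (hk : k < (pvBaseRow right).length),
      pvGood left right left.length k (pvBaseRow right)[k] := by
  have hlen : (pvBaseRow right).length = right.length + 1 := by simp [pvBaseRow]
  refine ⟨hlen, ?_⟩
  intro k hk
  rw [hlen] at hk
  by_cases hkR : k < right.length
  · have hcell : (pvBaseRow right)[k]'(by rw [hlen]; omega) = none := by
      unfold pvBaseRow
      rw [List.getElem_append_left (by simpa using hkR)]
      simp
    rw [hcell]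
    simp only [pvGood]
    intro x w hr
    cases hr with
    | refl => omega
    | takeR h1 h2 hc h => omega
    | skipL h1 h2 h => omega
    | both h1 h2 h => omega
  · have hkeq : k = right.length := by omega
    have hcell : (pvBaseRow right)[k]'(by rw [hlen]; omega) = some 0 := by
      unfold pvBaseRow
      rw [List.getElem_append_right (by simpa using Nat.le_of_eq hkeq.symm)]
      simp [hkeq]
    rw [hcell]
    simp only [pvGood]
    rw [hkeq]
    refine ⟨⟨left.length, Reach.refl left.length right.length 0⟩, ?_⟩
    intro x w hr
    cases hr with
    | refl => exact le_refl 0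
    | takeR h1 h2 hc h => omega
    | skipL h1 h2 h => omega
    | both h1 h2 h => omega

theorem pvRows_spec (left right : List Int) (ls : List Int) :
    ∀ (li : Nat), left.drop li = ls → li ≤ left.length →
      (ls.foldr (fun lc below => pvMkRow lc right below) (pvBaseRow right)).length
        = right.length + 1 ∧
      ∀ (k : Nat)
        (hk : k < (ls.foldr (fun lc below => pvMkRow lc right below) (pvBaseRow right)).length),
        pvGood left right li k
          (ls.foldr (fun lc below => pvMkRow lc right below) (pvBaseRow right))[k] := by
  induction ls with
  | nil =>
      intro li hdrop hli
      have hliL : li = left.length := by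
        have := List.drop_eq_nil_iff.mp hdrop
        omega
      subst hliL
      exact pvBaseRow_spec left right
  | cons lc ls' ih =>
      intro li hdrop hli
      have hliL : li < left.length := by
        by_contra hcon
        rw [List.drop_eq_nil_of_le (by omega)] at hdrop
        cases hdrop
      have hlc : left.getD li 0 = lc := by
        have h0 : (left.drop li)[0]? = some lc := by rw [hdrop]; rfl
        rw [List.getElem?_drop, Nat.add_zero] at h0
        rw [List.getD_eq_getElem?_getD, h0]
        rfl
      have hdrop' : left.drop (li + 1) = ls' := by
        have h1 : left.drop (li + 1) = (left.drop li).drop 1 := by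
          rw [List.drop_drop, Nat.add_comm]
        rw [h1, hdrop]
        rfl
      obtain ⟨ihlen, ihcells⟩ := ih (li + 1) hdrop' (by omega)
      simp only [List.foldr_cons]
      have hspec := pvMkRow_spec left right li hliL right 0
        (ls'.foldr (fun lc below => pvMkRow lc right below) (pvBaseRow right))
        (by rfl) (by omega) (by rw [ihlen]) (by intro k hk; simpa using ihcells k hk)
      rw [hlc] at hspec
      obtain ⟨hlen2, hcells2⟩ := hspec
      refine ⟨by rw [hlen2], ?_⟩
      intro k hk
      have h := hcells2 k hk
      simpa using h

-- ===== VERDICT (by name: the statement is the Claim_ definition above) =====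
theorem solution_spec : Claim_equal_solution := by
  intro left right _
  unfold Spec_solution
  unfold solution solution_alt
  set m0 : List (List Int) :=
    List.replicate (left.length + 1) (List.replicate (right.length + 1) (0 : Int)) with hm0
  set M : List (List Int) := doGameP left right 0 0 0 m0 with hM
  set T : List (Option Int) :=
    left.foldr (fun lc below => pvMkRow lc right below) (pvBaseRow right) with hT
  set g : List Int → Int := fun row => (PySem.List.pyGet? row (-1)).getD 0 with hg
  have hm0shape : pvShape left right m0 := by
    constructor
    · rw [hm0, List.length_replicate]
    · intro row hrow
      rw [List.eq_of_mem_replicate hrow, List.length_replicate]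
  have hm0cell : ∀ x y, pvGetCell m0 x y = 0 := by
    intro x y
    simp only [pvGetCell, hm0, List.getD_eq_getElem?_getD, List.getElem?_replicate]
    split
    · simp only [Option.getD_some, List.getElem?_replicate]
      split <;> rfl
    · rfl
  obtain ⟨hsF, monoF, reachF, charF⟩ :=
    doGame_spec left right (left.length + right.length) 0 0 0 m0 (by omega) (by omega)
      (by omega) hm0shape
  rw [← hM] at hsF monoF reachF charF
  have hgrow : ∀ (row : List Int), row.length = right.length + 1 →
      g row = row.getD right.length 0 := by
    intro row hlen
    rw [hg]
    simp only []
    rw [PySem.List.pyGet?_neg_one, List.getLast?_eq_getElem?, hlen,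
      List.getD_eq_getElem?_getD]
    simp
  have hcellrow : ∀ (x : Nat) (hx : x < M.length),
      pvGetCell M x right.length = g (M[x]) := by
    intro x hx
    unfold pvGetCell
    rw [getD_row M x hx, hgrow (M[x]) (hsF.2 _ (List.getElem_mem hx))]
  obtain ⟨hinit, hub, hmem⟩ := foldl_max_char g M 0
  have hAub : ∀ x w, Reach left right 0 0 0 x right.length w →
      w ≤ M.foldl (fun acc r => if acc < g r then g r else acc) 0 := by
    intro x w hr
    have hxle := (Reach_le hr (by omega) (by omega)).1
    have hx : x < M.length := by rw [hsF.1]; omega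
    have h1 := reachF x right.length w hr
    rw [hcellrow x hx] at h1
    exact le_trans h1 (hub _ (List.getElem_mem hx))
  have hAcases : M.foldl (fun acc r => if acc < g r then g r else acc) 0 = 0 ∨
      ∃ x, Reach left right 0 0 0 x right.length
        (M.foldl (fun acc r => if acc < g r then g r else acc) 0) := by
    rcases hmem with h | ⟨row, hrow, h⟩
    · exact Or.inl h
    · obtain ⟨x, hx, hxeq⟩ := List.mem_iff_getElem.mp hrow
      rcases charF x right.length with hch | hch
      · rw [hm0cell x right.length] at hch
        rw [hcellrow x hx, hxeq, ← h] at hch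
        exact Or.inl hch
      · rw [hcellrow x hx, hxeq, ← h] at hch
        exact Or.inr ⟨x, hch⟩
  -- B side
  obtain ⟨blen, bcells⟩ := pvRows_spec left right left 0 List.drop_zero (by omega)
  rw [← hT] at blen bcells
  cases hTc : T with
  | nil => rw [hTc] at blen; simp at blen
  | cons c rest =>
  have hcgood : pvGood left right 0 0 c := by
    have h := bcells 0 (by rw [hTc]; simp)
    simp only [hTc] at h
    simpa using h
  cases c with
  | none =>
      simp only [pvGood] at hcgood
      show M.foldl (fun acc r => if acc < g r then g r else acc) 0 = 0
      rcases hAcases with h | ⟨x, hx⟩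
      · exact h
      · exact absurd hx (hcgood x _)
  | some mx =>
      simp only [pvGood] at hcgood
      obtain ⟨⟨x0, hx0⟩, hbnd⟩ := hcgood
      show M.foldl (fun acc r => if acc < g r then g r else acc) 0 = max 0 mx
      have hle1 : mx ≤ M.foldl (fun acc r => if acc < g r then g r else acc) 0 :=
        hAub x0 mx hx0
      have hle2 : M.foldl (fun acc r => if acc < g r then g r else acc) 0 ≤ max 0 mx := by
        rcases hAcases with h | ⟨x, hx⟩
        · rw [h]; exact le_max_left 0 mx
        · exact le_trans (hbnd x _ hx) (le_max_right 0 mx)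
      exact le_antisymm hle2 (max_le hinit hle1)
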